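-- pv_equiv track=rewrite | github.com/philipps777/goit-algo-hw-08 | main.py | minimum_network_cables
-- ===== SOURCE A (Python) =====
-- import heapq
--
-- def minimum_network_cables(network_cables):
--
--     if not network_cables:
--         raise ValueError("Список кабелів порожній")
--     heapq.heapify(network_cables)
--
--     total_cost = 0
--
--     while len(network_cables) > 1:
--         cost = heapq.heappop(network_cables) + heapq.heappop(network_cables)
--         total_cost += cost
--         heapq.heappush(network_cables, cost)
--
--     return total_cost
-- ===== SOURCE B (Python) =====
-- def minimum_network_cables(network_cables):
--     # Sort once, then the linear two-queue Huffman merge: original cables are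
--     # consumed from the sorted list, produced sums are consumed from a FIFO
--     # queue; each step takes the two smallest among the two queue fronts.
--     if not network_cables:
--         raise ValueError("Список кабелів порожній")
--     cables = sorted(network_cables)
--     sums = []
--     i = 0
--     j = 0
--     total_cost = 0
--     while (len(cables) - i) + (len(sums) - j) > 1:
--         if j >= len(sums) or (i < len(cables) and cables[i] <= sums[j]):
--             a = cables[i]
--             i += 1
--         else:
--             a = sums[j]
--             j += 1
--         if j >= len(sums) or (i < len(cables) and cables[i] <= sums[j]):
--             b = cables[i]
--             i += 1
--         else:
--             b = sums[j]
--             j += 1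
--         cost = a + b
--         total_cost += cost
--         sums.append(cost)
--     return total_cost
-- ===== Notes on version B (the rewrite author's own statement) =====
-- stated objective: alternative
-- what changed: Replaces the binary heap with a sort followed by the linear two-queue Huffman merge (sorted originals and a FIFO queue of produced sums; each step pops the two smallest fronts), which yields the same total because pending sums stay in nondecreasing order.
import Mathlib
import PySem

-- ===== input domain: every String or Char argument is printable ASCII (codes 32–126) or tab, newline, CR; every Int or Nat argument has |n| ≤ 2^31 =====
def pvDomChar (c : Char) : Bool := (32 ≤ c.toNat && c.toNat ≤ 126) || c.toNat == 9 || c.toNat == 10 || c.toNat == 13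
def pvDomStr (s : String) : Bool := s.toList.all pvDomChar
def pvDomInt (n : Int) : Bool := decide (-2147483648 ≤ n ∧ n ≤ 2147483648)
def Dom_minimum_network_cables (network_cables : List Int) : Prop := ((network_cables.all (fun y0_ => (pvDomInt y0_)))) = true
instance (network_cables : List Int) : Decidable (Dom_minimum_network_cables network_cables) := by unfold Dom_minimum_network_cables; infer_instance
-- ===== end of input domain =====

-- B replaces A's binary heap with sort + the linear two-queue Huffman merge (alternative data
-- structure, same result). A mutates its argument in place (heapify, pops; the list ends as
-- [total] for length ≥ 2); B does not — the equivalence proved here is about the RETURN value only.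

-- ===== PORT A =====
-- heapq is modelled by its observable value semantics on a list of ints: heappop returns the
-- minimum of the current multiset and removes one occurrence of it, heappush adds the element,
-- heapify only rearranges. This is exact for the returned total: every value A ever reads out
-- of the heap is a minimum of the current multiset, and equal ints are indistinguishable.
def pvALoop (l : List Int) (total : Int) : Int :=
  if h : 1 < l.length then
    let a := l.min?.getD 0         -- heappop: l is nonempty, so min? is some
    let l1 := l.erase a
    let b := l1.min?.getD 0        -- heappop: l1 is nonempty (1 < l.length), so min? is some
    pvALoop ((a + b) :: l1.erase b) (total + (a + b))
  else total
termination_by l.length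
decreasing_by
  have hl : l ≠ [] := by intro h'; subst h'; simp at h
  obtain ⟨a0, ha0⟩ : ∃ a0, l.min? = some a0 := by
    cases hm : l.min? with
    | none => exact absurd (List.min?_eq_none_iff.mp hm) hl
    | some a0 => exact ⟨a0, rfl⟩
  have ha : l.min?.getD 0 ∈ l := by rw [ha0]; exact List.min?_mem ha0
  have h1 : (l.erase (l.min?.getD 0)).length = l.length - 1 := List.length_erase_of_mem ha
  have hl1 : l.erase (l.min?.getD 0) ≠ [] := by
    intro h'; rw [← List.length_eq_zero_iff] at h'; omega
  obtain ⟨b0, hb0⟩ : ∃ b0, (l.erase (l.min?.getD 0)).min? = some b0 := by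
    cases hm : (l.erase (l.min?.getD 0)).min? with
    | none => exact absurd (List.min?_eq_none_iff.mp hm) hl1
    | some b0 => exact ⟨b0, rfl⟩
  have hb : (l.erase (l.min?.getD 0)).min?.getD 0 ∈ l.erase (l.min?.getD 0) := by
    rw [hb0]; exact List.min?_mem hb0
  have h2 := List.length_erase_of_mem hb
  simp only [List.length_cons, h2, h1]
  omega

def minimum_network_cables (network_cables : List Int) : Int :=
  -- 'if not network_cables: raise ValueError(…)' → excluded by Pre_minimum_network_cables
  pvALoop network_cables 0

-- ===== PORT B =====
-- Source B walks read-only indices i (into the sorted cables) and j (into the sums queue); the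
-- already-consumed prefixes are never read again, so each (list, index) pair is ported as the
-- list of its remaining elements — exact, same branches in the same order.
-- One 'if j >= len(sums) or (i < len(cables) and cables[i] <= sums[j]): take a cable else take a
-- sum' pick; headD 0 is only reached where Python would read cables[i]/sums[j] in range (the
-- loop guard gives ≥ 2 remaining elements at each of the two picks).
def pvPick (xs ys : List Int) : Int × List Int × List Int :=
  if ys.isEmpty || (!xs.isEmpty && xs.headD 0 ≤ ys.headD 0) then
    (xs.headD 0, xs.tail, ys)
  else
    (ys.headD 0, xs, ys.tail)

theorem pvPick_length (xs ys : List Int) (h : 0 < xs.length + ys.length) :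
    (pvPick xs ys).2.1.length + (pvPick xs ys).2.2.length + 1 = xs.length + ys.length := by
  unfold pvPick
  split
  · rename_i hc
    cases xs with
    | nil =>
      cases ys with
      | nil => simp at h
      | cons y t => simp at hc
    | cons x t => simp; omega
  · rename_i hc
    cases ys with
    | nil => simp at hc
    | cons y t => simp; omega

def pvBLoop (xs ys : List Int) (total : Int) : Int :=
  if h : 1 < xs.length + ys.length then
    let p1 := pvPick xs ys
    let p2 := pvPick p1.2.1 p1.2.2
    pvBLoop p2.2.1 (p2.2.2 ++ [p1.1 + p2.1]) (total + (p1.1 + p2.1))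
  else total
termination_by xs.length + ys.length
decreasing_by
  have h1 := pvPick_length xs ys (by omega)
  have h2 := pvPick_length (pvPick xs ys).2.1 (pvPick xs ys).2.2 (by omega)
  simp only [List.length_append, List.length_cons, List.length_nil]
  omega

def minimum_network_cables_alt (network_cables : List Int) : Int :=
  -- 'if not network_cables: raise ValueError(…)' → excluded by Pre_minimum_network_cables
  pvBLoop (PySem.List.sorted network_cables (fun x => x) false) [] 0

-- ===== PRECONDITION & SPEC =====
-- Pre_ excludes exactly the empty list, on which the Python A raises ValueError (B raises too).
def Pre_minimum_network_cables (network_cables : List Int) : Prop := network_cables ≠ []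
instance (network_cables : List Int) : Decidable (Pre_minimum_network_cables network_cables) := by unfold Pre_minimum_network_cables; infer_instance
def pvWitness_minimum_network_cables : List Int := [4, 2, 9]

def Spec_minimum_network_cables (network_cables : List Int) (out : Int) : Prop := out = minimum_network_cables_alt network_cables
instance (network_cables : List Int) (out : Int) : Decidable (Spec_minimum_network_cables network_cables out) := by unfold Spec_minimum_network_cables; infer_instance

-- ===== CLAIM (what is proved, stated in full; the proofs are below) =====
def Claim_equal_minimum_network_cables : Prop := ∀ (network_cables : List Int), Dom_minimum_network_cables network_cables → Pre_minimum_network_cables network_cables → Spec_minimum_network_cables network_cables (minimum_network_cables network_cables)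

-- ===== LEMMAS AND PROOFS =====

-- min? is the same on permuted lists
theorem pvMin?_perm (l l' : List Int) (h : l.Perm l') : l.min? = l'.min? := by
  cases hm : l'.min? with
  | none =>
    rw [List.min?_eq_none_iff] at hm ⊢
    exact by subst hm; exact h.eq_nil
  | some a =>
    rw [List.min?_eq_some_iff] at hm ⊢
    exact ⟨h.mem_iff.mpr hm.1, fun b hb => hm.2 b (h.mem_iff.mp hb)⟩

-- unfold equations for the two loops
theorem pvALoop_le (l : List Int) (t : Int) (h : ¬ 1 < l.length) : pvALoop l t = t := by
  rw [pvALoop]; simp [h]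

theorem pvALoop_gt (l : List Int) (t : Int) (h : 1 < l.length) :
    pvALoop l t
      = pvALoop ((l.min?.getD 0 + (l.erase (l.min?.getD 0)).min?.getD 0)
            :: (l.erase (l.min?.getD 0)).erase ((l.erase (l.min?.getD 0)).min?.getD 0))
          (t + (l.min?.getD 0 + (l.erase (l.min?.getD 0)).min?.getD 0)) := by
  rw [pvALoop]; simp [h]

theorem pvBLoop_le (xs ys : List Int) (t : Int) (h : ¬ 1 < xs.length + ys.length) :
    pvBLoop xs ys t = t := by
  rw [pvBLoop]; simp [h]

theorem pvBLoop_gt (xs ys : List Int) (t : Int) (h : 1 < xs.length + ys.length) :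
    pvBLoop xs ys t
      = pvBLoop (pvPick (pvPick xs ys).2.1 (pvPick xs ys).2.2).2.1
          ((pvPick (pvPick xs ys).2.1 (pvPick xs ys).2.2).2.2
            ++ [(pvPick xs ys).1 + (pvPick (pvPick xs ys).2.1 (pvPick xs ys).2.2).1])
          (t + ((pvPick xs ys).1 + (pvPick (pvPick xs ys).2.1 (pvPick xs ys).2.2).1)) := by
  rw [pvBLoop]; simp [h]

-- min? of a nonempty list of ints is some
theorem pvMin?_isSome (l : List Int) (hl : l ≠ []) : ∃ a, l.min? = some a := by
  cases hm : l.min? with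
  | none => exact absurd (List.min?_eq_none_iff.mp hm) hl
  | some a => exact ⟨a, rfl⟩

-- pvALoop depends only on the multiset of its list argument
theorem pvALoop_perm (n : ℕ) (l l' : List Int) (t : Int) (hn : l.length = n) (h : l.Perm l') :
    pvALoop l t = pvALoop l' t := by
  induction n using Nat.strong_induction_on generalizing l l' t with
  | _ n ih =>
    by_cases hg : 1 < l.length
    · have hg' : 1 < l'.length := by rw [← h.length_eq]; exact hg
      rw [pvALoop_gt l t hg, pvALoop_gt l' t hg']
      have hmin : l'.min? = l.min? := (pvMin?_perm l l' h).symm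
      rw [hmin]
      have ha : l.min?.getD 0 ∈ l := by
        obtain ⟨a0, ha0⟩ := pvMin?_isSome l (by intro h'; subst h'; simp at hg)
        rw [ha0]; exact List.min?_mem ha0
      have he1 : (l.erase (l.min?.getD 0)).Perm (l'.erase (l.min?.getD 0)) := h.erase _
      have hmin2 : (l'.erase (l.min?.getD 0)).min? = (l.erase (l.min?.getD 0)).min? :=
        (pvMin?_perm _ _ he1).symm
      rw [hmin2]
      have h1 : (l.erase (l.min?.getD 0)).length = l.length - 1 := List.length_erase_of_mem ha
      have hb : (l.erase (l.min?.getD 0)).min?.getD 0 ∈ l.erase (l.min?.getD 0) := by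
        obtain ⟨b0, hb0⟩ := pvMin?_isSome (l.erase (l.min?.getD 0))
          (by intro h'; rw [← List.length_eq_zero_iff] at h'; omega)
        rw [hb0]; exact List.min?_mem hb0
      have h2 := List.length_erase_of_mem hb
      exact ih (l.length - 1) (by omega) _ _ _ (by simp only [List.length_cons]; omega)
        ((he1.erase _).cons _)
    · have hg' : ¬ 1 < l'.length := by rw [← h.length_eq]; exact hg
      rw [pvALoop_le l t hg, pvALoop_le l' t hg']

-- s is at most the sum of any two (distinct-occurrence) elements of l
def pvTwoLe (s : Int) (l : List Int) : Prop :=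
  ∀ u v (r : Multiset Int), (l : Multiset Int) = u ::ₘ v ::ₘ r → s ≤ u + v

theorem pvTwoLe_mono (s : Int) (L L' : List Int) (h : pvTwoLe s L)
    (hle : (L' : Multiset Int) ≤ (L : Multiset Int)) : pvTwoLe s L' := by
  intro u v r hr
  obtain ⟨d, hd⟩ := Multiset.le_iff_exists_add.mp hle
  exact h u v (r + d) (by rw [hd, hr]; simp [Multiset.cons_add])

-- every pending sum is at most the sum of any two elements it may later be merged with
def pvQ (xs ys : List Int) : Prop :=
  ∀ p s q, ys = p ++ s :: q → pvTwoLe s (xs ++ p)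

-- the head of a ≤-pairwise list is its minimum
theorem pvHead_le (x : Int) (t : List Int) (h : (x :: t).Pairwise (· ≤ ·)) :
    ∀ w ∈ x :: t, x ≤ w := by
  intro w hw
  rcases List.mem_cons.mp hw with rfl | hw
  · exact le_refl w
  · exact (List.pairwise_cons.mp h).1 w hw

-- pvPick takes the minimum of the two fronts = the minimum of everything (when both queues are sorted)
theorem pvPick_spec (xs ys : List Int) (hne : 0 < xs.length + ys.length)
    (hxs : xs.Pairwise (· ≤ ·)) (hys : ys.Pairwise (· ≤ ·)) :
    ((xs ++ ys : List Int) : Multiset Int)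
        = (pvPick xs ys).1 ::ₘ ((pvPick xs ys).2.1 ++ (pvPick xs ys).2.2 : List Int)
      ∧ (∀ w ∈ xs ++ ys, (pvPick xs ys).1 ≤ w)
      ∧ (((pvPick xs ys).2.1 = xs.tail ∧ (pvPick xs ys).2.2 = ys)
          ∨ ((pvPick xs ys).2.1 = xs ∧ (pvPick xs ys).2.2 = ys.tail)) := by
  unfold pvPick
  split
  · rename_i hc
    cases ys with
    | nil =>
      cases xs with
      | nil => simp at hne
      | cons x t =>
        refine ⟨by simp, ?_, Or.inl ⟨rfl, rfl⟩⟩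
        intro w hw
        simp only [List.headD_cons]
        exact pvHead_le x t hxs w (by simpa using hw)
    | cons y yt =>
      cases xs with
      | nil => simp at hc
      | cons x t =>
        simp only [List.isEmpty_cons, List.headD_cons, Bool.false_or, Bool.and_eq_true,
          decide_eq_true_eq] at hc
        refine ⟨by simp, ?_, Or.inl ⟨rfl, rfl⟩⟩
        intro w hw
        simp only [List.headD_cons]
        rw [List.mem_append] at hw
        rcases hw with hw | hw
        · exact pvHead_le x t hxs w hw
        · exact le_trans hc.2 (pvHead_le y yt hys w hw)
  · rename_i hc
    cases ys with
    | nil => simp at hc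
    | cons y yt =>
      have hco : ↑(xs ++ y :: yt) = y ::ₘ ((xs ++ yt : List Int) : Multiset Int) := by
        have hp : (xs ++ y :: yt).Perm (y :: (xs ++ yt)) := List.perm_middle
        rw [Multiset.coe_eq_coe.mpr hp, Multiset.cons_coe]
      refine ⟨by simpa using hco, ?_, Or.inr ⟨rfl, rfl⟩⟩
      intro w hw
      simp only [List.headD_cons]
      rw [List.mem_append] at hw
      rcases hw with hw | hw
      · cases xs with
        | nil => simp at hw
        | cons x t =>
          simp only [List.isEmpty_cons, List.headD_cons, Bool.false_or, Bool.and_eq_true,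
            decide_eq_true_eq, Bool.not_eq_true'] at hc
          push Not at hc
          have hyx : y ≤ x := le_of_lt (by simpa using hc)
          exact le_trans hyx (pvHead_le x t hxs w hw)
      · exact pvHead_le y yt hys w hw

-- splitting a decomposition of l ++ [c]
theorem pvSnoc_eq (l : List Int) (c : Int) (p : List Int) (s : Int) (q : List Int)
    (h : l ++ [c] = p ++ s :: q) :
    (p = l ∧ s = c ∧ q = []) ∨ ∃ q', q = q' ++ [c] ∧ l = p ++ s :: q' := by
  rcases List.append_eq_append_iff.mp h with ⟨as, h1, h2⟩ | ⟨bs, h1, h2⟩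
  · cases as with
    | nil =>
      simp only [List.append_nil] at h1
      cases h2
      exact Or.inl ⟨h1, rfl, rfl⟩
    | cons z zt =>
      simp only [List.cons_append, List.cons.injEq] at h2
      obtain ⟨rfl, h2⟩ := h2
      cases zt <;> simp at h2
  · cases bs with
    | nil =>
      simp only [List.append_nil] at h1
      cases h2
      exact Or.inl ⟨h1.symm, rfl, rfl⟩
    | cons z zt =>
      simp only [List.cons_append, List.cons.injEq] at h2
      obtain ⟨rfl, rfl⟩ := h2
      exact Or.inr ⟨zt, rfl, h1⟩

-- a multiset cons decomposition gives membership and a permutation of the erase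
theorem pvErase_of_cons (l rest : List Int) (a : Int)
    (hE : (l : Multiset Int) = a ::ₘ (rest : Multiset Int)) :
    a ∈ l ∧ (l.erase a).Perm rest := by
  have ha : a ∈ l := by rw [← Multiset.mem_coe, hE]; exact Multiset.mem_cons_self a _
  have h1 : l.Perm (a :: rest) := Multiset.coe_eq_coe.mp (by rw [hE, Multiset.cons_coe])
  exact ⟨ha, ((List.perm_cons_erase ha).symm.trans h1).cons_inv⟩

-- main induction: on sorted queues satisfying the invariant, the heap greedy equals the two-queue merge
theorem pvMain (n : ℕ) (xs ys : List Int) (t : Int) (hn : xs.length + ys.length = n)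
    (hxs : xs.Pairwise (· ≤ ·)) (hys : ys.Pairwise (· ≤ ·)) (hq : pvQ xs ys) :
    pvALoop (xs ++ ys) t = pvBLoop xs ys t := by
  induction n using Nat.strong_induction_on generalizing xs ys t with
  | _ n ih =>
    by_cases hg : 1 < xs.length + ys.length
    · obtain ⟨hE1, hM1, hD1⟩ := pvPick_spec xs ys (by omega) hxs hys
      have hlen1 := pvPick_length xs ys (by omega)
      have hxs1 : (pvPick xs ys).2.1.Pairwise (· ≤ ·) := by
        rcases hD1 with ⟨h1, _⟩ | ⟨h1, _⟩ <;> rw [h1]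
        · rw [← List.drop_one]; exact hxs.drop
        · exact hxs
      have hys1 : (pvPick xs ys).2.2.Pairwise (· ≤ ·) := by
        rcases hD1 with ⟨_, h2⟩ | ⟨_, h2⟩ <;> rw [h2]
        · exact hys
        · rw [← List.drop_one]; exact hys.drop
      obtain ⟨hE2, hM2, hD2⟩ :=
        pvPick_spec (pvPick xs ys).2.1 (pvPick xs ys).2.2 (by omega) hxs1 hys1
      have hlen2 := pvPick_length (pvPick xs ys).2.1 (pvPick xs ys).2.2 (by omega)
      -- abbreviations (definitional)
      set a := (pvPick xs ys).1 with hha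
      set xs1 := (pvPick xs ys).2.1 with hhx1
      set ys1 := (pvPick xs ys).2.2 with hhy1
      set b := (pvPick xs1 ys1).1 with hhb
      set xs2 := (pvPick xs1 ys1).2.1 with hhx2
      set ys2 := (pvPick xs1 ys1).2.2 with hhy2
      -- the two picks consume the first k cables and the first 2-k pending sums
      obtain ⟨k, hk2, hkx, hky⟩ : ∃ k, k ≤ 2 ∧ xs2 = xs.drop k ∧ ys2 = ys.drop (2 - k) := by
        rcases hD1 with ⟨h1, h2⟩ | ⟨h1, h2⟩ <;> rcases hD2 with ⟨g1, g2⟩ | ⟨g1, g2⟩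
        · exact ⟨2, le_refl 2, by rw [g1, h1, ← List.drop_one, ← List.drop_one, List.drop_drop],
            by rw [g2, h2]; simp⟩
        · exact ⟨1, by omega, by rw [g1, h1, List.drop_one],
            by rw [g2, h2, List.drop_one]⟩
        · exact ⟨1, by omega, by rw [g1, h1, List.drop_one],
            by rw [g2, h2, List.drop_one]⟩
        · exact ⟨0, by omega, by rw [g1, h1, List.drop_zero],
            by rw [g2, h2, ← List.drop_one, ← List.drop_one, List.drop_drop]⟩
      -- the popped pair {a, b} is exactly what the drops left out
      have htake : (↑(xs.take k) + ↑(ys.take (2 - k)) : Multiset Int) = {a, b} := by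
        have hsplit : ((xs ++ ys : List Int) : Multiset Int)
            = (↑(xs.take k) + ↑(ys.take (2 - k))) + ↑(xs2 ++ ys2) := by
          rw [hkx, hky]
          conv_lhs => rw [← List.take_append_drop k xs, ← List.take_append_drop (2 - k) ys]
          simp only [← Multiset.coe_add]
          abel
        have hcons : ((xs ++ ys : List Int) : Multiset Int)
            = ({a, b} : Multiset Int) + ↑(xs2 ++ ys2) := by
          rw [hE1, hE2]
          simp only [Multiset.insert_eq_cons, Multiset.cons_add]
          simp
        exact add_right_cancel (hsplit.symm.trans hcons)
      -- every surviving pending sum is at most the new sum a + b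
      have hsurv : ∀ s ∈ ys2, ∀ p2, ∀ q2, ys2 = p2 ++ s :: q2 → s ≤ a + b := by
        intro s _ p2 q2 hdec
        have hysdec : ys = (ys.take (2 - k) ++ p2) ++ s :: q2 := by
          conv_lhs => rw [← List.take_append_drop (2 - k) ys]
          rw [← hky, hdec, List.append_assoc]
        have htw := hq (ys.take (2 - k) ++ p2) s q2 hysdec
        refine htw a b (↑(xs.drop k) + ↑p2) ?_
        have : ((xs ++ (ys.take (2 - k) ++ p2) : List Int) : Multiset Int)
            = (↑(xs.take k) + ↑(ys.take (2 - k))) + (↑(xs.drop k) + ↑p2) := by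
          conv_lhs => rw [← List.take_append_drop k xs]
          simp only [← Multiset.coe_add]
          abel
        rw [this, htake]
        simp [Multiset.insert_eq_cons, Multiset.cons_add]
      -- invariant for the next state
      have hxs2 : xs2.Pairwise (· ≤ ·) := by rw [hkx]; exact hxs.drop
      have hys2p : ys2.Pairwise (· ≤ ·) := by rw [hky]; exact hys.drop
      have hab : a ≤ b := by
        obtain ⟨hbmem, _⟩ := pvErase_of_cons _ _ _ hE2
        have : b ∈ xs ++ ys := by
          rw [← Multiset.mem_coe, hE1]
          exact Multiset.mem_cons_of_mem (by rw [Multiset.mem_coe]; exact hbmem)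
        exact hM1 b this
      have hys' : (ys2 ++ [a + b]).Pairwise (· ≤ ·) := by
        rw [List.pairwise_append]
        refine ⟨hys2p, by simp, ?_⟩
        intro s hs c hc
        rw [List.mem_singleton] at hc
        subst hc
        obtain ⟨p2, q2, hdec⟩ := List.append_of_mem hs
        exact hsurv s hs p2 q2 hdec
      have hq' : pvQ xs2 (ys2 ++ [a + b]) := by
        intro p s q hpq
        rcases pvSnoc_eq ys2 (a + b) p s q hpq with ⟨rfl, rfl, rfl⟩ | ⟨q', _, hdec⟩
        · -- the new sum: bounded by any two remaining elements, all of which are ≥ b ≥ a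
          intro u v r hr
          have hu : u ∈ xs2 ++ ys2 := by
            rw [← Multiset.mem_coe, hr]; exact Multiset.mem_cons_self u _
          have hv : v ∈ xs2 ++ ys2 := by
            rw [← Multiset.mem_coe, hr]
            exact Multiset.mem_cons_of_mem (Multiset.mem_cons_self v _)
          have hub : b ≤ u := by
            refine hM2 u ?_
            rw [← Multiset.mem_coe, hE2]
            exact Multiset.mem_cons_of_mem (by rw [Multiset.mem_coe]; exact hu)
          have hvb : b ≤ v := by
            refine hM2 v ?_
            rw [← Multiset.mem_coe, hE2]
            exact Multiset.mem_cons_of_mem (by rw [Multiset.mem_coe]; exact hv)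
          linarith
        · -- a surviving pending sum: shrink the allowed multiset
          have hysdec : ys = (ys.take (2 - k) ++ p) ++ s :: q' := by
            conv_lhs => rw [← List.take_append_drop (2 - k) ys]
            rw [← hky, hdec, List.append_assoc]
          refine pvTwoLe_mono s (xs ++ (ys.take (2 - k) ++ p)) _
            (hq (ys.take (2 - k) ++ p) s q' hysdec) ?_
          rw [Multiset.le_iff_exists_add]
          refine ⟨↑(xs.take k) + ↑(ys.take (2 - k)), ?_⟩
          conv_lhs => rw [← List.take_append_drop k xs]
          rw [hkx]
          simp only [← Multiset.coe_add]
          abel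
      -- A's step: pop the two minima, push their sum
      have hlapp : 1 < (xs ++ ys).length := by simp only [List.length_append]; omega
      obtain ⟨hamem, hpermA⟩ := pvErase_of_cons _ _ _ hE1
      have hminA : (xs ++ ys).min? = some a := List.min?_eq_some_iff.mpr ⟨hamem, hM1⟩
      obtain ⟨hbmem, hpermB⟩ := pvErase_of_cons _ _ _ hE2
      have hminB : ((xs ++ ys).erase a).min? = some b := by
        rw [pvMin?_perm _ _ hpermA]
        exact List.min?_eq_some_iff.mpr ⟨hbmem, hM2⟩
      rw [pvALoop_gt _ t hlapp]
      simp only [hminA, Option.getD_some, hminB]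
      have hl2 : (((xs ++ ys).erase a).erase b).Perm (xs2 ++ ys2) :=
        (hpermA.erase b).trans hpermB
      have hrec : ((a + b) :: ((xs ++ ys).erase a).erase b).Perm (xs2 ++ (ys2 ++ [a + b])) := by
        refine (hl2.cons (a + b)).trans ?_
        rw [← List.append_assoc]
        exact (List.perm_append_singleton (a + b) (xs2 ++ ys2)).symm
      rw [pvALoop_perm _ _ _ _ rfl hrec]
      rw [pvBLoop_gt xs ys t hg]
      exact ih (n - 1) (by omega) xs2 (ys2 ++ [a + b]) (t + (a + b))
        (by simp only [List.length_append, List.length_cons, List.length_nil]; omega)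
        hxs2 hys' hq'
    · rw [pvBLoop_le xs ys t hg, pvALoop_le]
      simp only [List.length_append]
      omega

-- ===== VERDICT (by name: the statement is the Claim_ definition above) =====
theorem minimum_network_cables_spec : Claim_equal_minimum_network_cables := by
  intro nc _ _
  unfold Spec_minimum_network_cables minimum_network_cables minimum_network_cables_alt
  have hperm : nc.Perm (PySem.List.sorted nc (fun x => x) false ++ []) := by
    simpa using (PySem.List.sorted_perm (xs := nc) (key := fun x => x) (rev := false)).symm
  rw [pvALoop_perm nc.length nc _ 0 rfl hperm]
  exact pvMain _ _ [] 0 rfl (by simpa using PySem.List.sorted_pairwise (xs := nc) (key := fun x => x))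
    (by simp) (by intro p s q hpq; simp at hpq)
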